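-- pv_equiv track=rewrite | github.com/oapandit/ProbBertForBridging | corpus.py | _get_current_parse
-- ===== SOURCE A (Python) =====
-- def _get_current_parse(parse_bit):
--     parse_bit_list = []
--     pos = ""
--     for ch in parse_bit:
--         if ch == "(" or ch == ")":
--             if len(pos) > 0:
--                 parse_bit_list.append(pos)
--                 pos = ""
--         else:
--             pos += ch
--     if len(pos) > 0:
--         parse_bit_list.append(pos)
--     # logger.debug("parse bit {} and last parse {}".format(parse_bit,parse_bit_list[-1]))
--     return parse_bit_list.pop()
-- ===== SOURCE B (Python) =====
-- def _get_current_parse(parse_bit):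
--     # reverse scan: collect the trailing token, stop at the first paren after it
--     acc = []
--     for ch in reversed(parse_bit):
--         if ch == "(" or ch == ")":
--             if acc:
--                 break
--         else:
--             acc.append(ch)
--     return "".join(reversed(acc))
-- ===== Notes on version B (the rewrite author's own statement) =====
-- stated objective: alternative
-- what changed: B scans the string back-to-front, collecting only the last token and stopping early at the first parenthesis before it, instead of building the whole token list and popping its last element.
import Mathlib
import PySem

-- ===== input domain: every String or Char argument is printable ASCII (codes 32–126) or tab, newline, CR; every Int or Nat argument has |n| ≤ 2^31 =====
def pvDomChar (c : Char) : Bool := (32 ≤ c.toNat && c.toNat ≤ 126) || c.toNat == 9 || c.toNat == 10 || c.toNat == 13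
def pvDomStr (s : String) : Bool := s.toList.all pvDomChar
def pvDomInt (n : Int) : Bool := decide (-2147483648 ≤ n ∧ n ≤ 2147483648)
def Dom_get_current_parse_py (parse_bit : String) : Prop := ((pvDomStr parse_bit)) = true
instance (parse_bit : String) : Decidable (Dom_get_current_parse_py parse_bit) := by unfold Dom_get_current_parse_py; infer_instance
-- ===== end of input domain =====

-- B replaces A's full left-to-right tokenisation with a reverse scan that collects only the
-- last token and stops early (objective: alternative decomposition, same worst-case cost).

-- ===== PORT A =====
-- loop body of A: state = (parse_bit_list, pos); pos kept as List Char ('pos += ch' = append)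
def aStep (st : List (List Char) × List Char) (ch : Char) : List (List Char) × List Char :=
  if ch = '(' ∨ ch = ')' then
    if st.2.length > 0 then (st.1 ++ [st.2], ([] : List Char)) else st
  else (st.1, st.2 ++ [ch])

def get_current_parse_py (parse_bit : String) : String :=
  let st := parse_bit.toList.foldl aStep ([], [])
  let lst := if st.2.length > 0 then st.1 ++ [st.2] else st.1
  -- .pop(): raises IndexError on an empty list; Pre_ excludes exactly that case, default unused inside Pre_
  String.mk (lst.getLastD [])

-- ===== PORT B =====
-- reverse loop of B: consing to acc while scanning the reversed list rebuilds the token in order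
def altLoop : List Char → List Char → List Char
  | [], acc => acc
  | c :: rest, acc =>
    if c = '(' ∨ c = ')' then
      if acc.isEmpty then altLoop rest acc else acc
    else altLoop rest (c :: acc)

def get_current_parse_py_alt (parse_bit : String) : String :=
  String.mk (altLoop parse_bit.toList.reverse [])

-- ===== PRECONDITION & SPEC =====
-- Pre_ excludes exactly the inputs on which Python A raises IndexError (pop from empty list):
-- strings whose characters are all parentheses (including the empty string).
def Pre_get_current_parse_py (parse_bit : String) : Prop :=
  (parse_bit.toList.any (fun c => !(c = '(' || c = ')'))) = true
instance (parse_bit : String) : Decidable (Pre_get_current_parse_py parse_bit) := by unfold Pre_get_current_parse_py; infer_instance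
def pvWitness_get_current_parse_py : String := "(NP (a dog))"

def Spec_get_current_parse_py (parse_bit : String) (out : String) : Prop := out = get_current_parse_py_alt parse_bit
instance (parse_bit : String) (out : String) : Decidable (Spec_get_current_parse_py parse_bit out) := by unfold Spec_get_current_parse_py; infer_instance

-- ===== CLAIM (what is proved, stated in full; the proofs are below) =====
def Claim_equal_get_current_parse_py : Prop := ∀ (parse_bit : String), Dom_get_current_parse_py parse_bit → Pre_get_current_parse_py parse_bit → Spec_get_current_parse_py parse_bit (get_current_parse_py parse_bit)

-- ===== LEMMAS AND PROOFS =====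

def np (c : Char) : Bool := !(c = '(' ∨ c = ')')

-- B's loop with a non-empty accumulator: it prepends the leading non-paren run of its input
lemma altLoop_ne (r acc : List Char) (h : acc ≠ []) :
    altLoop r acc = (r.takeWhile np).reverse ++ acc := by
  induction r generalizing acc with
  | nil => simp [altLoop]
  | cons c rest ih =>
    by_cases hc : c = '(' ∨ c = ')'
    · simp [altLoop, hc, List.takeWhile, np, List.isEmpty_iff, h]
    · simp only [altLoop, if_neg hc]
      rw [ih (c :: acc) (by simp)]
      simp [List.takeWhile, np, hc]

-- A's 'pos' after the fold is the trailing non-paren run of the input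
lemma pos_eq (l : List Char) :
    (l.foldl aStep ([], [])).2 = (l.reverse.takeWhile np).reverse := by
  induction l using List.reverseRecOn with
  | nil => simp
  | append_singleton l c ih =>
    by_cases hc : c = '(' ∨ c = ')'
    · simp only [List.foldl_append, List.foldl_cons, List.foldl_nil, aStep, if_pos hc]
      have hnp : np c = false := by simp [np, hc]
      simp only [List.reverse_append, List.reverse_cons, List.reverse_nil, List.nil_append,
        List.cons_append, List.takeWhile_cons, hnp]
      simp only [Bool.false_eq_true]
      split <;> simp_all
    · simp [List.foldl_append, aStep, hc, np, ih]

-- main correspondence, on the underlying character list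
lemma main_eq (l : List Char) :
    (if (l.foldl aStep ([], [])).2.length > 0
       then (l.foldl aStep ([], [])).1 ++ [(l.foldl aStep ([], [])).2]
       else (l.foldl aStep ([], [])).1).getLastD [] = altLoop l.reverse [] := by
  induction l using List.reverseRecOn with
  | nil => simp [altLoop]
  | append_singleton l c ih =>
    simp only [List.reverse_append, List.reverse_cons, List.reverse_nil, List.nil_append,
      List.cons_append, List.foldl_append, List.foldl_cons, List.foldl_nil]
    by_cases hc : c = '(' ∨ c = ')'
    · -- paren: B skips it (acc empty), A flushes pos; last token unchanged
      simp only [altLoop, if_pos hc, List.isEmpty_nil]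
      rw [← ih]
      simp only [aStep, if_pos hc]
      by_cases hp : (l.foldl aStep ([], [])).2.length > 0
      · simp [hp]
      · simp [hp]
    · -- non-paren: B starts the accumulator with c, A appends c to pos
      simp only [altLoop, if_neg hc]
      rw [altLoop_ne _ _ (by simp), ← pos_eq]
      simp [aStep, hc]

-- ===== VERDICT (by name: the statement is the Claim_ definition above) =====
theorem get_current_parse_py_spec : Claim_equal_get_current_parse_py := by
  intro s _ _
  exact congrArg String.mk (main_eq s.toList)
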